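-- pv_equiv track=rewrite | github.com/SeBaS2x/1er_Cuatrimestre_progrmacion | clase_10/desafios_Bidimensionales/desafio deteccion de secuencias/funciones.py | contar_ocurrencias
-- ===== SOURCE A (Python) =====
-- def buscar_secuencia(matriz):
--     for i in range(len(matriz)):
--         secuencia =[]
--         for j in range(len(matriz[0])):
--             if matriz[i][j] % 2 == 0:
--                 secuencia = secuencia + [matriz[i][j]]
--                 if len(secuencia)== 2:
--                     return True
--
-- def contar_ocurrencias(matriz):
--     if not buscar_secuencia(matriz):
--         return 0
--     else:
--         contador = 0
--         for i in range(len(matriz)):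
--             secuencia = []
--             for j in range(len(matriz[0])):
--                 if matriz[i][j] % 2 == 0:
--                     secuencia = secuencia + [matriz[i][j]]
--                     if len(secuencia) == 2:
--                         contador += 1
--                         secuencia = []
--         return contador
-- ===== SOURCE B (Python) =====
-- def contar_ocurrencias(matriz):
--     if not matriz:
--         return 0
--     w = len(matriz[0])
--     return sum(sum(1 for x in fila[:w] if x % 2 == 0) // 2 for fila in matriz)
-- ===== Notes on version B (the rewrite author's own statement) =====
-- stated objective: simpler
-- what changed: Replaces the redundant pre-scan (buscar_secuencia) and the resettable two-element pairing buffer with a single sum: per row, count evens in the first len(matriz[0]) elements and add evens // 2; one pass instead of two and no per-even list concatenation.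
import Mathlib
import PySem

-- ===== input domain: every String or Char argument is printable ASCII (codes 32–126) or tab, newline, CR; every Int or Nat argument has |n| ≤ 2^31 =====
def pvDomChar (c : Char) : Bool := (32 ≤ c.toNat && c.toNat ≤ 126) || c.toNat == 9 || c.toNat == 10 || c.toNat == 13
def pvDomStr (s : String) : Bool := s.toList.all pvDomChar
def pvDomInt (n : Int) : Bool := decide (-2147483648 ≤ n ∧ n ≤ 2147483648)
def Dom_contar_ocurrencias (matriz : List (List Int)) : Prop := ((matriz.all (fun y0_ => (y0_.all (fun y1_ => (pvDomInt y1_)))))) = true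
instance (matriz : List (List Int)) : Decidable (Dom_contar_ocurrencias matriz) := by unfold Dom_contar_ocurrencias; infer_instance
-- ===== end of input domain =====

-- B replaces A's pre-scan helper and resettable two-element pairing buffer by summing evens//2
-- per row (objective: simpler). Where A raises IndexError (a row shorter than row 0), B returns
-- the count over the elements that exist; those inputs are outside Pre_ (see Raises_ below).

-- ===== PORT A =====
-- inner loop of buscar_secuencia over j in range(w) for one row, with the pairing buffer `sec`
def pvBuscarRow (fila : List Int) (w j : Nat) (sec : List Int) : Bool :=
  if j < w then
    let x := fila.getD j 0   -- matriz[i][j]; in range under Pre_ (Python raises otherwise)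
    if PySem.Int.mod x 2 = 0 then
      let sec' := sec ++ [x]
      if sec'.length = 2 then true
      else pvBuscarRow fila w (j+1) sec'
    else pvBuscarRow fila w (j+1) sec
  else false
termination_by w - j

-- outer loop of buscar_secuencia over the rows; returns True early, else falls off (None ~ false)
def pvBuscarRows (w : Nat) : List (List Int) → Bool
  | [] => false
  | fila :: rest => if pvBuscarRow fila w 0 [] then true else pvBuscarRows w rest

def pvBuscarSecuencia (matriz : List (List Int)) : Bool :=
  pvBuscarRows ((matriz.headD []).length) matriz

-- inner counting loop of contar_ocurrencias for one row (buffer resets after each pair)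
def pvContRow (fila : List Int) (w j : Nat) (sec : List Int) (contador : Int) : Int :=
  if j < w then
    let x := fila.getD j 0
    if PySem.Int.mod x 2 = 0 then
      let sec' := sec ++ [x]
      if sec'.length = 2 then pvContRow fila w (j+1) [] (contador+1)
      else pvContRow fila w (j+1) sec' contador
    else pvContRow fila w (j+1) sec contador
  else contador
termination_by w - j

def pvContRows (w : Nat) : List (List Int) → Int → Int
  | [], c => c
  | fila :: rest, c => pvContRows w rest (pvContRow fila w 0 [] c)

def contar_ocurrencias (matriz : List (List Int)) : Int :=
  if !pvBuscarSecuencia matriz then 0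
  else pvContRows ((matriz.headD []).length) matriz 0

-- ===== PORT B =====
def contar_ocurrencias_alt (matriz : List (List Int)) : Int :=
  match matriz with
  | [] => 0
  | fila0 :: _ =>
    let w := fila0.length
    (matriz.map (fun fila =>
      (((fila.take w).countP (fun x => PySem.Int.mod x 2 = 0) / 2 : Nat) : Int))).sum

-- ===== PRECONDITION & SPEC =====
-- Pre_ excludes exactly the ragged matrices (some row shorter than row 0), on which Python A
-- raises IndexError while indexing matriz[i][j].
def Pre_contar_ocurrencias (matriz : List (List Int)) : Prop :=
  ∀ fila ∈ matriz, (matriz.headD []).length ≤ fila.length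
instance (matriz : List (List Int)) : Decidable (Pre_contar_ocurrencias matriz) := by
  unfold Pre_contar_ocurrencias; infer_instance
def pvWitness_contar_ocurrencias : List (List Int) := [[2, 3, 4], [1, 6, 8]]

def Spec_contar_ocurrencias (matriz : List (List Int)) (out : Int) : Prop := out = contar_ocurrencias_alt matriz
instance (matriz : List (List Int)) (out : Int) : Decidable (Spec_contar_ocurrencias matriz out) := by unfold Spec_contar_ocurrencias; infer_instance

-- ===== CLAIM (what is proved, stated in full; the proofs are below) =====
def Claim_equal_contar_ocurrencias : Prop := ∀ (matriz : List (List Int)), Dom_contar_ocurrencias matriz → Pre_contar_ocurrencias matriz → Spec_contar_ocurrencias matriz (contar_ocurrencias matriz)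

-- ===== LEMMAS AND PROOFS =====

-- evens-per-row counter
def pvE : Int → Bool := fun x => PySem.Int.mod x 2 = 0

lemma pvBuscarRow_char (fila : List Int) (w : Nat) (hw : w ≤ fila.length) :
    ∀ j sec, j ≤ w → sec.length ≤ 1 →
      pvBuscarRow fila w j sec = (2 ≤ ((fila.drop j).take (w - j)).countP pvE + sec.length) := by
  intro j sec hj hsec
  obtain ⟨n, hn⟩ : ∃ n, w - j = n := ⟨w - j, rfl⟩
  induction n generalizing j sec with
  | zero =>
    have hjw : ¬ j < w := by omega
    rw [pvBuscarRow, if_neg hjw]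
    have : w - j = 0 := by omega
    simp [this]
    omega
  | succ n ih =>
    have hjw : j < w := by omega
    have hjl : j < fila.length := by omega
    rw [pvBuscarRow, if_pos hjw]
    have hdrop : fila.drop j = fila[j] :: fila.drop (j+1) := List.drop_eq_getElem_cons hjl
    have hget : fila.getD j 0 = fila[j] := List.getD_eq_getElem fila 0 hjl
    have htake : (fila.drop j).take (w - j)
        = fila[j] :: (fila.drop (j+1)).take (w - (j+1)) := by
      rw [hdrop]
      have : w - j = (w - (j+1)) + 1 := by omega
      rw [this, List.take_succ_cons]
    rw [htake, List.countP_cons]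
    simp only [hget]
    by_cases he : PySem.Int.mod fila[j] 2 = 0
    · rw [if_pos he]
      have hpe : pvE fila[j] = true := by simp only [pvE, decide_eq_true_eq]; exact he
      rcases Nat.le_one_iff_eq_zero_or_eq_one.mp hsec with h0 | h1
      · have hlen : (sec ++ [fila[j]]).length = 1 := by simp [h0]
        rw [if_neg (by omega : ¬ (sec ++ [fila[j]]).length = 2)]
        rw [ih (j+1) (sec ++ [fila[j]]) (by omega) (by omega) (by omega)]
        simp [hpe, h0]
      · have hlen : (sec ++ [fila[j]]).length = 2 := by simp [h1]
        rw [if_pos hlen]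
        simp [hpe, h1]
    · rw [if_neg he]
      have hpe : pvE fila[j] = false := by simp only [pvE, decide_eq_false_iff_not]; exact he
      rw [ih j.succ sec (by omega) hsec (by omega)]
      simp [hpe]

lemma pvContRow_char (fila : List Int) (w : Nat) (hw : w ≤ fila.length) :
    ∀ j sec c, j ≤ w → sec.length ≤ 1 →
      pvContRow fila w j sec c
        = c + (((((fila.drop j).take (w - j)).countP pvE + sec.length) / 2 : Nat) : Int) := by
  intro j sec c hj hsec
  obtain ⟨n, hn⟩ : ∃ n, w - j = n := ⟨w - j, rfl⟩
  induction n generalizing j sec c with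
  | zero =>
    have hjw : ¬ j < w := by omega
    rw [pvContRow, if_neg hjw]
    have h0 : w - j = 0 := by omega
    have hdiv : sec.length / 2 = 0 := by omega
    simp [h0, hdiv]
  | succ n ih =>
    have hjw : j < w := by omega
    have hjl : j < fila.length := by omega
    rw [pvContRow, if_pos hjw]
    have hdrop : fila.drop j = fila[j] :: fila.drop (j+1) := List.drop_eq_getElem_cons hjl
    have hget : fila.getD j 0 = fila[j] := List.getD_eq_getElem fila 0 hjl
    have htake : (fila.drop j).take (w - j)
        = fila[j] :: (fila.drop (j+1)).take (w - (j+1)) := by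
      rw [hdrop]
      have : w - j = (w - (j+1)) + 1 := by omega
      rw [this, List.take_succ_cons]
    rw [htake, List.countP_cons]
    simp only [hget]
    by_cases he : PySem.Int.mod fila[j] 2 = 0
    · rw [if_pos he]
      have hpe : pvE fila[j] = true := by simp only [pvE, decide_eq_true_eq]; exact he
      rcases Nat.le_one_iff_eq_zero_or_eq_one.mp hsec with h0 | h1
      · have hlen : (sec ++ [fila[j]]).length = 1 := by simp [h0]
        rw [if_neg (by omega : ¬ (sec ++ [fila[j]]).length = 2)]
        rw [ih (j+1) (sec ++ [fila[j]]) c (by omega) (by omega) (by omega)]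
        simp [hpe, h0]
      · have hlen : (sec ++ [fila[j]]).length = 2 := by simp [h1]
        rw [if_pos hlen]
        rw [ih (j+1) ([] : List Int) (c+1) (by omega) (by simp) (by omega)]
        simp only [hpe, if_true, h1, List.length_nil, Nat.add_zero]
        rw [show (((fila.drop (j+1)).take (w - (j+1))).countP pvE + 1 + 1) / 2
              = ((fila.drop (j+1)).take (w - (j+1))).countP pvE / 2 + 1 from by omega]
        push_cast
        ring
    · rw [if_neg he]
      have hpe : pvE fila[j] = false := by simp only [pvE, decide_eq_false_iff_not]; exact he
      rw [ih j.succ sec c (by omega) hsec (by omega)]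
      simp [hpe]

lemma pvE_eq : pvE = fun x => decide (2 ∣ x) := by
  funext x; simp [pvE]

lemma pvContRows_eq (w : Nat) (l : List (List Int)) (hpre : ∀ fila ∈ l, w ≤ fila.length)
    (c : Int) :
    pvContRows w l c
      = c + (l.map (fun fila => (((fila.take w).countP pvE / 2 : Nat) : Int))).sum := by
  induction l generalizing c with
  | nil => simp [pvContRows]
  | cons f rest ih =>
    rw [pvContRows]
    rw [pvContRow_char f w (hpre f (by simp)) 0 [] c (by omega) (by simp)]
    rw [ih (fun fila h => hpre fila (by simp [h]))]
    simp
    ring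

lemma pvBuscarRows_false (w : Nat) (l : List (List Int)) (hpre : ∀ fila ∈ l, w ≤ fila.length)
    (hb : pvBuscarRows w l = false) :
    ∀ fila ∈ l, (fila.take w).countP pvE ≤ 1 := by
  induction l with
  | nil => simp
  | cons f rest ih =>
    rw [pvBuscarRows] at hb
    by_cases hf : pvBuscarRow f w 0 [] = true
    · rw [if_pos hf] at hb; exact absurd hb (by simp)
    · rw [if_neg hf] at hb
      have hch := pvBuscarRow_char f w (hpre f (by simp)) 0 [] (by omega) (by simp)
      rw [hch] at hf
      simp only [List.drop_zero, Nat.sub_zero, List.length_nil, Nat.add_zero] at hf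
      intro fila hm
      rcases List.mem_cons.mp hm with rfl | hm'
      · omega
      · exact ih (fun g h => hpre g (by simp [h])) hb fila hm'

-- ===== VERDICT (by name: the statement is the Claim_ definition above) =====
theorem contar_ocurrencias_spec : Claim_equal_contar_ocurrencias := by
  intro matriz _hdom hpre
  unfold Spec_contar_ocurrencias
  cases matriz with
  | nil => simp [contar_ocurrencias, contar_ocurrencias_alt, pvBuscarSecuencia, pvBuscarRows]
  | cons f0 rest =>
    have hpre' : ∀ fila ∈ f0 :: rest, f0.length ≤ fila.length := by
      intro fila h
      simpa using hpre fila h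
    rw [contar_ocurrencias, contar_ocurrencias_alt]
    simp only [List.headD_cons]
    by_cases hb : pvBuscarSecuencia (f0 :: rest) = true
    · rw [hb]
      simp only [Bool.not_true, Bool.false_eq_true, if_false]
      rw [pvContRows_eq f0.length (f0 :: rest) hpre' 0]
      simp [pvE_eq]
    · rw [Bool.not_eq_true] at hb
      rw [hb]
      simp only [Bool.not_false, if_true]
      have hle := pvBuscarRows_false f0.length (f0 :: rest) hpre'
        (by simpa [pvBuscarSecuencia] using hb)
      have hz : ∀ fila ∈ f0 :: rest,
          ((((fila.take f0.length).countP fun x => PySem.Int.mod x 2 = 0) / 2 : Nat) : Int) = 0 := by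
        intro fila h
        have h1 := hle fila h
        rw [pvE_eq] at h1
        have h2 : ((fila.take f0.length).countP fun x => decide (2 ∣ x)) / 2 = 0 := by omega
        simp [h2]
      rw [List.sum_eq_zero]
      intro x hx
      rcases List.mem_map.mp hx with ⟨fila, hm, rfl⟩
      exact hz fila hm
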